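-- pv_equiv track=rewrite | github.com/zejwant/Zejwant | storage/metadata.py | diff_schemas
-- ===== SOURCE A (Python) =====
-- from typing import Any, Dict, List, Optional, Tuple
--
-- def diff_schemas(
--     old: Dict[str, str], new: Dict[str, str]
-- ) -> Dict[str, Tuple[Optional[str], Optional[str]]]:
--     """
--     Compare two schemas and return differences.
--
--     Args:
--         old (Dict[str, str]): Old schema column types.
--         new (Dict[str, str]): New schema column types.
--
--     Returns:
--         Dict[str, Tuple[Optional[str], Optional[str]]]:
--             key -> (old_type, new_type)
--     """
--     diff = {}
--     all_cols = set(old.keys()).union(new.keys())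
--     for col in all_cols:
--         old_type = old.get(col)
--         new_type = new.get(col)
--         if old_type != new_type:
--             diff[col] = (old_type, new_type)
--     return diff
-- ===== SOURCE B (Python) =====
-- from typing import Dict, Optional, Tuple
--
--
-- def diff_schemas(
--     old: Dict[str, str], new: Dict[str, str]
-- ) -> Dict[str, Tuple[Optional[str], Optional[str]]]:
--     # Two comprehensions instead of a key-set union pass:
--     # columns present in old whose type changed (or disappeared), then columns only in new.
--     changed = {c: (t, new.get(c)) for c, t in old.items() if new.get(c) != t}
--     added = {c: (None, t) for c, t in new.items() if c not in old}
--     return {**changed, **added}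
-- ===== Notes on version B (the rewrite author's own statement) =====
-- stated objective: idiomatic
-- what changed: Replaces the explicit key-set union and lookup loop by two dict comprehensions traversing old.items() and new.items() directly (changed/removed columns, then added columns), merged at the end; no set is built.
import Mathlib
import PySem

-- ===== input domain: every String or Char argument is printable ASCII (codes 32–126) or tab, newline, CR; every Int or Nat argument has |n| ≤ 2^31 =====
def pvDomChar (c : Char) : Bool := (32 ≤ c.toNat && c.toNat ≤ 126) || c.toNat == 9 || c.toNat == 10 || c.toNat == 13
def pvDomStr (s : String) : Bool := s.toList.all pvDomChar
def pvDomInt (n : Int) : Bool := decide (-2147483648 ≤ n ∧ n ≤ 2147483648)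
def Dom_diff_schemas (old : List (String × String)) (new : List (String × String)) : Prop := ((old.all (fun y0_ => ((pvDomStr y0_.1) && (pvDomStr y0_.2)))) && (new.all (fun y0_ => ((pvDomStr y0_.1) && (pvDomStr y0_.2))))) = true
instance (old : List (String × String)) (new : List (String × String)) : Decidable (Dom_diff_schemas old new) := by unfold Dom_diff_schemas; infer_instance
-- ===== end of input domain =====

-- B replaces A's key-set union pass by two comprehensions over the dicts themselves (idiomatic; same cost).
-- Both dict parameters are modelled as insertion-ordered association lists; lookup is first match.
-- The output dict is compared as a dict (order-insensitive on the Python side).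

-- ===== PORT A =====
-- A: all_cols = set(old.keys()) | set(new.keys()); emit every col whose two lookups differ.
def diff_schemas (old : List (String × String)) (new : List (String × String)) : List (String × Option String × Option String) :=
  let oldD := PySem.Dict.mk old
  let newD := PySem.Dict.mk new
  let allCols := PySem.Set.union (PySem.Set.ofList oldD.keys) newD.keys
  allCols.foldl (fun diff col =>
    let oldType := oldD.get? col
    let newType := newD.get? col
    if oldType ≠ newType then diff ++ [(col, oldType, newType)] else diff) []

-- ===== PORT B =====
-- B: two dict comprehensions, then {**changed, **added} (disjoint keys, so concatenation).
-- An item (c, t) of a dict is its key c with t = the dict's (first-match) lookup at c, so each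
-- comprehension over d.items() is filter+map over the dict's distinct keys with t = d.get? c.
def diff_schemas_alt (old : List (String × String)) (new : List (String × String)) : List (String × Option String × Option String) :=
  let oldD := PySem.Dict.mk old
  let newD := PySem.Dict.mk new
  let changed := ((PySem.List.dedup oldD.keys).filter (fun c => decide (newD.get? c ≠ oldD.get? c))).map
      (fun c => (c, oldD.get? c, newD.get? c))
  let added := ((PySem.List.dedup newD.keys).filter (fun c => decide (oldD.get? c = none))).map
      (fun c => (c, (none : Option String), newD.get? c))
  changed ++ added

-- ===== PRECONDITION & SPEC =====
def Spec_diff_schemas (old : List (String × String)) (new : List (String × String)) (out : List (String × Option String × Option String)) : Prop := out = diff_schemas_alt old new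
instance (old : List (String × String)) (new : List (String × String)) (out : List (String × Option String × Option String)) : Decidable (Spec_diff_schemas old new out) := by unfold Spec_diff_schemas; infer_instance

-- ===== CLAIM (what is proved, stated in full; the proofs are below) =====
def Claim_equal_diff_schemas : Prop := ∀ (old : List (String × String)) (new : List (String × String)), Dom_diff_schemas old new → Spec_diff_schemas old new (diff_schemas old new)

-- ===== LEMMAS AND PROOFS =====

theorem diff_schemas_eq_alt (old new : List (String × String)) :
    diff_schemas old new = diff_schemas_alt old new := by
  unfold diff_schemas diff_schemas_alt
  set oldD := PySem.Dict.mk old with hod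
  set newD := PySem.Dict.mk new with hnd
  -- the loop body appends exactly when the condition holds
  have hfold := PySem.List.foldl_append_if
      (fun c => decide (oldD.get? c ≠ newD.get? c))
      (fun c => (c, oldD.get? c, newD.get? c))
      (PySem.Set.union (PySem.Set.ofList oldD.keys) newD.keys) []
  simp only [decide_eq_true_eq] at hfold
  rw [hfold]
  -- the union set is old's distinct keys followed by new's keys not in old
  have hunion : PySem.Set.union (PySem.Set.ofList oldD.keys) newD.keys
      = PySem.Set.ofList oldD.keys
        ++ (PySem.Set.ofList newD.keys).filter (fun c => !(PySem.Set.ofList oldD.keys).contains c) := by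
    exact PySem.Set.update_eq_append_filter (PySem.Set.ofList oldD.keys) newD.keys
  rw [hunion, List.filter_append, List.map_append, List.nil_append, List.filter_filter]
  simp only [PySem.List.dedup_eq_ofList]
  congr 1
  · -- columns of old: same filter (≠ is symmetric), same map
    apply congrArg
    apply List.filter_congr
    intro c _
    simp only [decide_eq_decide]
    exact ne_comm
  · -- columns of new not in old: the old lookup is none there, and the new lookup is never none
    have hfil : (PySem.Set.ofList newD.keys).filter
          (fun a => decide (oldD.get? a ≠ newD.get? a) && !(PySem.Set.ofList oldD.keys).contains a)
        = (PySem.Set.ofList newD.keys).filter (fun c => decide (oldD.get? c = none)) := by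
      apply List.filter_congr
      intro c hc
      have hcnew : c ∈ newD.keys := (PySem.Set.mem_ofList (xs := newD.keys) (y := c)).1 hc
      by_cases hcold : c ∈ oldD.keys
      · have h1 : oldD.get? c ≠ none := by
          simp [PySem.Dict.get?_eq_none_iff_not_mem_keys, hcold]
        have h2 : (PySem.Set.ofList oldD.keys).contains c = true := by
          rw [PySem.Set.contains_iff]
          exact (PySem.Set.mem_ofList _ _).2 hcold
        simp only [h2, Bool.not_true, Bool.and_false]
        simp [h1]
      · have h1 : oldD.get? c = none := by
          rw [PySem.Dict.get?_eq_none_iff_not_mem_keys]; exact hcold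
        have h2 : (PySem.Set.ofList oldD.keys).contains c = false := by
          rw [← Bool.not_eq_true, PySem.Set.contains_iff]
          simp [PySem.Set.mem_ofList, hcold]
        have h3 : newD.get? c ≠ none := by
          simp [PySem.Dict.get?_eq_none_iff_not_mem_keys, hcnew]
        simp only [h2, Bool.not_false, Bool.and_true, h1, ne_eq]
        simp [h3.symm]
    rw [hfil]
    apply List.map_congr_left
    intro c hc
    have h1 : oldD.get? c = none := by simpa using List.of_mem_filter hc
    simp [h1]

-- ===== VERDICT (by name: the statement is the Claim_ definition above) =====
theorem diff_schemas_spec : Claim_equal_diff_schemas := by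
  intro old new _
  unfold Spec_diff_schemas
  exact diff_schemas_eq_alt old new
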